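-- pv_equiv track=rewrite | github.com/eff917/advent-of-code | python/2020/dec16/2/main.py | field_passes_rule
-- ===== SOURCE A (Python) =====
-- def field_passes_rule(field_set, rule_ranges):
--     valid_fields = set()
--     for field in field_set:
--         for rule in rule_ranges:
--             if field >= rule[0] and field <= rule[1]:
--                 valid_fields.add(field)
--     # if all fields are valid:
--     if valid_fields == field_set:
--         return True
--     else:
--         return False
-- ===== SOURCE B (Python) =====
-- def _bisect_right(a, x):
--     lo, hi = 0, len(a)
--     while lo < hi:
--         mid = (lo + hi) // 2
--         if x < a[mid]:
--             hi = mid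
--         else:
--             lo = mid + 1
--     return lo
--
--
-- def field_passes_rule(field_set, rule_ranges):
--     # Merge the ranges (sorted by lower bound) into disjoint intervals once,
--     # then locate each field's candidate interval by binary search; early exit.
--     merged = []
--     for lo, hi in sorted(rule_ranges, key=lambda r: r[0]):
--         if merged and lo <= merged[-1][1]:
--             if hi > merged[-1][1]:
--                 merged[-1] = (merged[-1][0], hi)
--         else:
--             merged.append((lo, hi))
--     starts = [m[0] for m in merged]
--     for field in field_set:
--         i = _bisect_right(starts, field) - 1
--         if i < 0 or field > merged[i][1]:
--             return False
--     return True
-- ===== Notes on version B (the rewrite author's own statement) =====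
-- stated objective: faster
-- what changed: Instead of testing every field against every rule range and comparing a set of valid fields with the input set, B sorts the ranges once, merges them into disjoint intervals, and binary-searches each field's candidate interval with an early exit on the first uncovered field.
import Mathlib
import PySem

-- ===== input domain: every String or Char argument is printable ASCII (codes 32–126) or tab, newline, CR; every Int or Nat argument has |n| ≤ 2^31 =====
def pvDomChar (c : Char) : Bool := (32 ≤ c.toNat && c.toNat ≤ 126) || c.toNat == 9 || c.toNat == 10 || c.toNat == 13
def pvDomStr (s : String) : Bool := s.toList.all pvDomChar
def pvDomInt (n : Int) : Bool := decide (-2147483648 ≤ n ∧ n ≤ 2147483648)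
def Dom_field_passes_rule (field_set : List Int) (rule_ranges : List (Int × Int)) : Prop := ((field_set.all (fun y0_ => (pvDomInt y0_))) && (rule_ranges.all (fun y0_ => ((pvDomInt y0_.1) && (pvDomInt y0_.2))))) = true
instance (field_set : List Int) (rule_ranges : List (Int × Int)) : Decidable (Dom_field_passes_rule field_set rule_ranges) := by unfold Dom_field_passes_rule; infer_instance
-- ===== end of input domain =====

-- ===== PORT A =====
-- B faster: merged sorted disjoint intervals + binary search per field (see header of Source B).
def field_passes_rule (field_set : List Int) (rule_ranges : List (Int × Int)) : Bool :=
  -- valid_fields = set(); for field in field_set: for rule in rule_ranges: if …: valid_fields.add(field)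
  let valid_fields : PySem.Set Int :=
    field_set.foldl (fun v field =>
      rule_ranges.foldl (fun v rule =>
        if field ≥ rule.1 && field ≤ rule.2 then PySem.Set.add v field else v) v)
      PySem.Set.empty
  -- if valid_fields == field_set: return True else: return False  (Python set equality)
  if PySem.Set.equal valid_fields field_set then true else false

-- ===== PORT B =====
-- merged is built appending / mutating the LAST element in Python; ported as a fold with the
-- accumulator kept reversed (head = merged[-1]) and a final .reverse.
def pvMergeStep (acc : List (Int × Int)) (r : Int × Int) : List (Int × Int) :=
  match acc with
  | [] => [r]
  | (plo, phi) :: t =>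
    if r.1 ≤ phi then
      if r.2 > phi then (plo, r.2) :: t else (plo, phi) :: t
    else r :: (plo, phi) :: t

-- _bisect_right's while-loop; a[mid] is always in range when read (lo < hi ≤ len a), so getD is exact.
def pvBisectRight (a : List Int) (x : Int) (lo hi : Nat) : Nat :=
  if _h : lo < hi then
    let mid := (lo + hi) / 2
    if x < a.getD mid 0 then pvBisectRight a x lo mid
    else pvBisectRight a x (mid + 1) hi
  else lo
termination_by hi - lo
decreasing_by all_goals omega

-- the 'for field in field_set: … return False' loop with its early exit; merged[i] is read only
-- when 0 ≤ i < len merged (bisect_right returns ≤ len starts = len merged), so getD is exact.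
def pvCheckFields (merged : List (Int × Int)) (starts : List Int) : List Int → Bool
  | [] => true
  | f :: t =>
    let i : Int := (pvBisectRight starts f 0 starts.length : Int) - 1
    if i < 0 || f > (merged.getD i.toNat (0, 0)).2 then false
    else pvCheckFields merged starts t

def field_passes_rule_alt (field_set : List Int) (rule_ranges : List (Int × Int)) : Bool :=
  let merged := ((PySem.List.sorted rule_ranges (fun r => r.1) false).foldl pvMergeStep []).reverse
  let starts := merged.map Prod.fst
  pvCheckFields merged starts field_set

-- ===== PRECONDITION & SPEC =====
def Spec_field_passes_rule (field_set : List Int) (rule_ranges : List (Int × Int)) (out : Bool) : Prop := out = field_passes_rule_alt field_set rule_ranges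
instance (field_set : List Int) (rule_ranges : List (Int × Int)) (out : Bool) : Decidable (Spec_field_passes_rule field_set rule_ranges out) := by unfold Spec_field_passes_rule; infer_instance

-- ===== CLAIM (what is proved, stated in full; the proofs are below) =====
def Claim_equal_field_passes_rule : Prop := ∀ (field_set : List Int) (rule_ranges : List (Int × Int)), Dom_field_passes_rule field_set rule_ranges → Spec_field_passes_rule field_set rule_ranges (field_passes_rule field_set rule_ranges)

-- ===== LEMMAS AND PROOFS =====

-- x is covered by some range of rs
abbrev pvCov (rs : List (Int × Int)) (x : Int) : Prop := ∃ r ∈ rs, r.1 ≤ x ∧ x ≤ r.2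

-- the ordering invariant of the merged list: starts nondecreasing, intervals separated
def pvR (p q : Int × Int) : Prop := p.1 ≤ q.1 ∧ p.2 < q.1

-- ---- A-side characterisation ----

lemma mem_inner (rs : List (Int × Int)) (v : PySem.Set Int) (f x : Int) :
    x ∈ rs.foldl (fun v rule => if f ≥ rule.1 && f ≤ rule.2 then PySem.Set.add v f else v) v ↔
      x ∈ v ∨ (x = f ∧ pvCov rs f) := by
  induction rs generalizing v with
  | nil => simp [pvCov]
  | cons r t ih =>
    simp only [List.foldl_cons, ih, pvCov, List.mem_cons]
    by_cases h : f ≥ r.1 && f ≤ r.2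
    · simp only [h, if_pos, PySem.Set.mem_add]
      simp only [Bool.and_eq_true, decide_eq_true_eq, ge_iff_le] at h
      constructor
      · rintro ((hv | hx) | ⟨hx, rr, hrr, h1, h2⟩)
        · exact Or.inl hv
        · exact Or.inr ⟨hx, r, Or.inl rfl, h.1, h.2⟩
        · exact Or.inr ⟨hx, rr, Or.inr hrr, h1, h2⟩
      · rintro (hv | ⟨hx, rr, (rfl | hrr), h1, h2⟩)
        · exact Or.inl (Or.inl hv)
        · exact Or.inl (Or.inr hx)
        · exact Or.inr ⟨hx, rr, hrr, h1, h2⟩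
    · simp only [h, if_neg, Bool.false_eq_true, not_false_iff]
      simp only [Bool.and_eq_true, decide_eq_true_eq, ge_iff_le, not_and_or, not_le] at h
      constructor
      · rintro (hv | ⟨hx, rr, hrr, h1, h2⟩)
        · exact Or.inl hv
        · exact Or.inr ⟨hx, rr, Or.inr hrr, h1, h2⟩
      · rintro (hv | ⟨hx, rr, (rfl | hrr), h1, h2⟩)
        · exact Or.inl hv
        · rcases h with h | h <;> omega
        · exact Or.inr ⟨hx, rr, hrr, h1, h2⟩

lemma mem_valid (fs : List Int) (rs : List (Int × Int)) (v : PySem.Set Int) (x : Int) :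
    x ∈ fs.foldl (fun v field =>
        rs.foldl (fun v rule => if field ≥ rule.1 && field ≤ rule.2 then PySem.Set.add v field else v) v) v ↔
      x ∈ v ∨ (x ∈ fs ∧ pvCov rs x) := by
  induction fs generalizing v with
  | nil => simp
  | cons f t ih =>
    simp only [List.foldl_cons, ih, mem_inner, List.mem_cons]
    constructor
    · rintro ((hv | ⟨rfl, hc⟩) | ⟨ht, hc⟩)
      · exact Or.inl hv
      · exact Or.inr ⟨Or.inl rfl, hc⟩
      · exact Or.inr ⟨Or.inr ht, hc⟩
    · rintro (hv | ⟨(rfl | ht), hc⟩)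
      · exact Or.inl (Or.inl hv)
      · exact Or.inl (Or.inr ⟨rfl, hc⟩)
      · exact Or.inr ⟨ht, hc⟩

lemma lemA (fs : List Int) (rs : List (Int × Int)) :
    field_passes_rule fs rs = fs.all (fun f => decide (pvCov rs f)) := by
  unfold field_passes_rule
  simp only []
  have hmem := mem_valid fs rs PySem.Set.empty
  by_cases h : ∀ f ∈ fs, pvCov rs f
  · have : PySem.Set.equal (fs.foldl (fun v field =>
        rs.foldl (fun v rule => if field ≥ rule.1 && field ≤ rule.2 then PySem.Set.add v field else v) v)
        PySem.Set.empty) fs = true := by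
      rw [PySem.Set.equal_iff]
      intro x
      rw [hmem x]
      simp only [PySem.Set.empty, List.not_mem_nil, false_or]
      exact ⟨fun h' => h'.1, fun hx => ⟨hx, h x hx⟩⟩
    rw [if_pos this]
    symm
    rw [List.all_eq_true]
    intro f hf
    exact decide_eq_true (h f hf)
  · push_neg at h
    obtain ⟨f, hf, hnc⟩ := h
    have : PySem.Set.equal (fs.foldl (fun v field =>
        rs.foldl (fun v rule => if field ≥ rule.1 && field ≤ rule.2 then PySem.Set.add v field else v) v)
        PySem.Set.empty) fs = false := by
      rw [Bool.eq_false_iff]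
      intro hc
      rw [PySem.Set.equal_iff] at hc
      have := (hc f).mpr hf
      rw [hmem f] at this
      simp only [PySem.Set.empty, List.not_mem_nil, false_or] at this
      obtain ⟨r, hr, h1, h2⟩ := this.2
      exact absurd h2 (not_le.mpr (hnc r hr h1))
    rw [this]
    simp only [Bool.false_eq_true, if_false]
    symm
    rw [List.all_eq_false]
    refine ⟨f, hf, ?_⟩
    simp only [decide_eq_true_eq]
    rintro ⟨r, hr, h1, h2⟩
    exact absurd h2 (not_le.mpr (hnc r hr h1))

-- ---- B-side: merged-list invariants ----

lemma merge_invariant (l : List (Int × Int)) (acc : List (Int × Int))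
    (hl : l.Pairwise (fun p q => p.1 ≤ q.1))
    (hacc : acc.Pairwise (fun q p => pvR p q))
    (hhd : ∀ r' ∈ l, ∀ hd ∈ acc.head?, hd.1 ≤ r'.1) :
    (l.foldl pvMergeStep acc).Pairwise (fun q p => pvR p q) ∧
      (∀ x, (∃ p ∈ l.foldl pvMergeStep acc, p.1 ≤ x ∧ x ≤ p.2) ↔
        (∃ p ∈ acc, p.1 ≤ x ∧ x ≤ p.2) ∨ pvCov l x) ∧
      (∀ hd ∈ (l.foldl pvMergeStep acc).head?, ∀ hd₀ ∈ acc.head?, hd₀.1 ≤ hd.1) := by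
  induction l generalizing acc with
  | nil =>
    refine ⟨hacc, fun x => by simp [pvCov], ?_⟩
    intro hd h1 hd₀ h2
    simp only [List.foldl_nil] at h1
    rw [h1] at h2
    cases h2
    exact le_refl _
  | cons r l ih =>
    obtain ⟨hr1, hl'⟩ := List.pairwise_cons.mp hl
    simp only [List.foldl_cons]
    rcases acc with _ | ⟨⟨plo, phi⟩, t⟩
    · -- acc = []: step appends r
      have hstep : pvMergeStep [] r = [r] := rfl
      rw [hstep]
      obtain ⟨c1, c2, c3⟩ := ih [r] hl'
        (List.pairwise_singleton _ _)
        (by intro r' hr' hd hhd'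
            simp only [List.head?_cons, Option.mem_def, Option.some.injEq] at hhd'
            subst hhd'; exact hr1 r' hr')
      refine ⟨c1, ?_, ?_⟩
      · intro x
        rw [c2 x]
        constructor
        · rintro (⟨p, hp, h1, h2⟩ | ⟨p, hp, h1, h2⟩)
          · rw [List.mem_singleton] at hp
            subst hp
            exact Or.inr ⟨p, List.mem_cons_self, h1, h2⟩
          · exact Or.inr ⟨p, List.mem_cons_of_mem _ hp, h1, h2⟩
        · rintro (⟨p, hp, h1, h2⟩ | ⟨p, hp, h1, h2⟩)
          · simp at hp
          · rw [List.mem_cons] at hp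
            rcases hp with rfl | hp
            · exact Or.inl ⟨p, List.mem_singleton.mpr rfl, h1, h2⟩
            · exact Or.inr ⟨p, hp, h1, h2⟩
      · intro hd _ hd₀ h2
        simp at h2
    · -- acc = (plo, phi) :: t
      have hplo : plo ≤ r.1 := hhd r (List.mem_cons_self) (plo, phi) rfl
      obtain ⟨hhead, ht⟩ := List.pairwise_cons.mp hacc
      by_cases hm : r.1 ≤ phi
      · -- merge into the head interval
        set nhi := if r.2 > phi then r.2 else phi with hnhi
        have hstep : pvMergeStep ((plo, phi) :: t) r = (plo, nhi) :: t := by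
          simp only [pvMergeStep, if_pos hm, hnhi]
          by_cases h2 : r.2 > phi <;> simp [h2]
        rw [hstep]
        have hacc' : ((plo, nhi) :: t).Pairwise (fun q p => pvR p q) :=
          List.pairwise_cons.mpr ⟨fun q hq => hhead q hq, ht⟩
        obtain ⟨c1, c2, c3⟩ := ih ((plo, nhi) :: t) hl' hacc'
          (by intro r' hr' hd hhd'
              simp only [List.head?_cons, Option.mem_def, Option.some.injEq] at hhd'
              subst hhd'; exact le_trans hplo (hr1 r' hr'))
        refine ⟨c1, ?_, ?_⟩
        · intro x
          rw [c2 x]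
          have hphi : phi ≤ nhi := by rw [hnhi]; by_cases h2 : r.2 > phi <;> simp [h2] <;> omega
          have hr2 : r.2 ≤ nhi := by rw [hnhi]; by_cases h2 : r.2 > phi <;> simp [h2] <;> omega
          constructor
          · rintro (⟨p, hp, h1, h2⟩ | hc)
            · rw [List.mem_cons] at hp
              rcases hp with rfl | hp
              · -- x in (plo, nhi): either in (plo, phi) or in r
                by_cases hx : x ≤ phi
                · exact Or.inl ⟨(plo, phi), List.mem_cons_self, h1, hx⟩
                · refine Or.inr ⟨r, List.mem_cons_self, ?_, ?_⟩
                  · omega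
                  · simp only [hnhi] at h2; by_cases hgt : r.2 > phi <;> simp [hgt] at h2 <;> omega
              · exact Or.inl ⟨p, List.mem_cons_of_mem _ hp, h1, h2⟩
            · rcases hc with ⟨p, hp, h1, h2⟩
              exact Or.inr ⟨p, List.mem_cons_of_mem _ hp, h1, h2⟩
          · rintro (⟨p, hp, h1, h2⟩ | ⟨p, hp, h1, h2⟩)
            · rw [List.mem_cons] at hp
              rcases hp with rfl | hp
              · exact Or.inl ⟨(plo, nhi), List.mem_cons_self, h1, le_trans h2 hphi⟩
              · exact Or.inl ⟨p, List.mem_cons_of_mem _ hp, h1, h2⟩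
            · rw [List.mem_cons] at hp
              rcases hp with rfl | hp
              · exact Or.inl ⟨(plo, nhi), List.mem_cons_self, le_trans hplo h1, le_trans h2 hr2⟩
              · exact Or.inr ⟨p, hp, h1, h2⟩
        · intro hd h1 hd₀ h2
          simp only [List.head?_cons, Option.mem_def, Option.some.injEq] at h2
          subst h2
          exact c3 hd h1 (plo, nhi) rfl
      · -- append r
        have hstep : pvMergeStep ((plo, phi) :: t) r = r :: (plo, phi) :: t := by
          simp [pvMergeStep, hm]
        rw [hstep]
        have hacc' : (r :: (plo, phi) :: t).Pairwise (fun q p => pvR p q) := by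
          refine List.pairwise_cons.mpr ⟨?_, hacc⟩
          intro q hq
          rw [List.mem_cons] at hq
          rcases hq with rfl | hq
          · exact ⟨hplo, by omega⟩
          · obtain ⟨hq1, hq2⟩ := hhead q hq
            exact ⟨le_trans hq1 hplo, by omega⟩
        obtain ⟨c1, c2, c3⟩ := ih (r :: (plo, phi) :: t) hl' hacc'
          (by intro r' hr' hd hhd'
              simp only [List.head?_cons, Option.mem_def, Option.some.injEq] at hhd'
              subst hhd'; exact hr1 r' hr')
        refine ⟨c1, ?_, ?_⟩
        · intro x
          rw [c2 x]
          constructor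
          · rintro (⟨p, hp, h1, h2⟩ | ⟨p, hp, h1, h2⟩)
            · rw [List.mem_cons] at hp
              rcases hp with rfl | hp
              · exact Or.inr ⟨p, List.mem_cons_self, h1, h2⟩
              · exact Or.inl ⟨p, hp, h1, h2⟩
            · exact Or.inr ⟨p, List.mem_cons_of_mem _ hp, h1, h2⟩
          · rintro (⟨p, hp, h1, h2⟩ | ⟨p, hp, h1, h2⟩)
            · exact Or.inl ⟨p, List.mem_cons_of_mem _ hp, h1, h2⟩
            · rw [List.mem_cons] at hp
              rcases hp with rfl | hp
              · exact Or.inl ⟨p, List.mem_cons_self, h1, h2⟩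
              · exact Or.inr ⟨p, hp, h1, h2⟩
        · intro hd h1 hd₀ h2
          simp only [List.head?_cons, Option.mem_def, Option.some.injEq] at h2
          subst h2
          exact le_trans hplo (c3 hd h1 r rfl)

-- ---- binary search ----

lemma getD_mono (a : List Int) (ha : a.Pairwise (· ≤ ·)) (j k : Nat) (hjk : j ≤ k)
    (hk : k < a.length) : a.getD j 0 ≤ a.getD k 0 := by
  rcases eq_or_lt_of_le hjk with rfl | hlt
  · exact le_refl _
  · rw [List.getD_eq_getElem a 0 (lt_trans hlt hk), List.getD_eq_getElem a 0 hk]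
    exact List.pairwise_iff_getElem.mp ha j k (lt_trans hlt hk) hk hlt

lemma bsr_spec (a : List Int) (x : Int) (ha : a.Pairwise (· ≤ ·)) :
    ∀ n lo hi, hi - lo = n → lo ≤ hi → hi ≤ a.length →
      (∀ j < lo, a.getD j 0 ≤ x) → (∀ j, hi ≤ j → j < a.length → x < a.getD j 0) →
      lo ≤ pvBisectRight a x lo hi ∧ pvBisectRight a x lo hi ≤ hi ∧
        (∀ j < pvBisectRight a x lo hi, a.getD j 0 ≤ x) ∧
        (∀ j, pvBisectRight a x lo hi ≤ j → j < a.length → x < a.getD j 0) := by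
  intro n
  induction n using Nat.strong_induction_on with
  | _ n ih =>
    intro lo hi hn hlh hhl hlo hhi
    rw [pvBisectRight]
    by_cases h : lo < hi
    · rw [dif_pos h]
      simp only []
      set mid := (lo + hi) / 2 with hmid
      have hmlo : lo ≤ mid := by omega
      have hmhi : mid < hi := by omega
      by_cases hc : x < a.getD mid 0
      · rw [if_pos hc]
        have := ih (mid - lo) (by omega) lo mid rfl (by omega) (by omega) hlo
          (fun j hj hjl => lt_of_lt_of_le hc (getD_mono a ha mid j hj hjl))
        exact ⟨this.1, le_trans this.2.1 (le_of_lt hmhi), this.2.2⟩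
      · rw [if_neg hc]
        push_neg at hc
        have := ih (hi - (mid + 1)) (by omega) (mid + 1) hi rfl (by omega) hhl
          (fun j hj => le_trans (getD_mono a ha j mid (by omega) (by omega)) hc) hhi
        exact ⟨le_trans (by omega) this.1, this.2.1, this.2.2⟩
    · rw [dif_neg h]
      have : lo = hi := by omega
      subst this
      exact ⟨le_refl _, le_refl _, hlo, hhi⟩

-- ---- B-side characterisation ----

lemma check_one (m : List (Int × Int)) (f : Int) (hm : m.Pairwise pvR) :
    ((decide ((pvBisectRight (m.map Prod.fst) f 0 (m.map Prod.fst).length : Int) - 1 < 0) ||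
      decide (f > (m.getD ((pvBisectRight (m.map Prod.fst) f 0 (m.map Prod.fst).length : Int) - 1).toNat (0, 0)).2)) = false) ↔
      (∃ p ∈ m, p.1 ≤ f ∧ f ≤ p.2) := by
  have hs : (m.map Prod.fst).Pairwise (· ≤ ·) := List.pairwise_map.mpr (hm.imp (fun h => h.1))
  have hlen : (m.map Prod.fst).length = m.length := by simp
  obtain ⟨h0, hr, hlo, hhi⟩ := bsr_spec (m.map Prod.fst) f hs ((m.map Prod.fst).length - 0)
    0 (m.map Prod.fst).length rfl (by omega) (le_refl _)
    (fun j hj => absurd hj (Nat.not_lt_zero j))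
    (fun j hj hjl => absurd (lt_of_le_of_lt hj hjl) (lt_irrefl _))
  set r := pvBisectRight (m.map Prod.fst) f 0 (m.map Prod.fst).length with hrdef
  have hsm : ∀ j (hj : j < m.length), (m.map Prod.fst).getD j 0 = m[j].1 := by
    intro j hj
    rw [List.getD_eq_getElem _ 0 (by omega), List.getElem_map]
  rw [Bool.or_eq_false_iff, decide_eq_false_iff_not, decide_eq_false_iff_not]
  constructor
  · rintro ⟨h1, h2⟩
    have hr1 : 1 ≤ r := by omega
    have hidx : ((r : Int) - 1).toNat = r - 1 := by omega
    have hrm : r - 1 < m.length := by omega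
    refine ⟨m[r - 1], List.getElem_mem hrm, ?_, ?_⟩
    · have := hlo (r - 1) (by omega)
      rwa [hsm (r - 1) hrm] at this
    · rw [hidx] at h2
      rw [List.getD_eq_getElem _ (0, 0) hrm] at h2
      omega
  · rintro ⟨p, hp, h1, h2⟩
    obtain ⟨j, hj, rfl⟩ := List.mem_iff_getElem.mp hp
    have hjr : j < r := by
      by_contra hc
      have := hhi j (by omega) (by omega)
      rw [hsm j hj] at this
      omega
    have hr1 : 1 ≤ r := by omega
    have hidx : ((r : Int) - 1).toNat = r - 1 := by omega
    have hrm : r - 1 < m.length := by omega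
    have hstart : m[r - 1].1 ≤ f := by
      have := hlo (r - 1) (by omega)
      rwa [hsm (r - 1) hrm] at this
    have hend : f ≤ m[r - 1].2 := by
      rcases Nat.lt_or_ge j (r - 1) with hlt | hge
      · have hpw := List.pairwise_iff_getElem.mp hm j (r - 1) hj hrm hlt
        exact absurd (lt_of_le_of_lt h2 (lt_of_lt_of_le hpw.2 hstart)) (lt_irrefl f)
      · have : j = r - 1 := by omega
        subst this
        exact h2
    refine ⟨by omega, ?_⟩
    rw [hidx, List.getD_eq_getElem _ (0, 0) hrm]
    omega

lemma lemB (fs : List Int) (rs : List (Int × Int)) :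
    field_passes_rule_alt fs rs = fs.all (fun f => decide (pvCov rs f)) := by
  unfold field_passes_rule_alt
  simp only []
  obtain ⟨c1, c2, _⟩ := merge_invariant (PySem.List.sorted rs (fun r => r.1) false) []
    (PySem.List.sorted_pairwise rs (fun r => r.1))
    List.Pairwise.nil
    (by intro r' _ hd h; simp at h)
  set m := ((PySem.List.sorted rs (fun r => r.1) false).foldl pvMergeStep []).reverse with hmdef
  have hmp : m.Pairwise pvR := by
    rw [hmdef, List.pairwise_reverse]
    exact c1
  have hcovm : ∀ x, (∃ p ∈ m, p.1 ≤ x ∧ x ≤ p.2) ↔ pvCov rs x := by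
    intro x
    have : (∃ p ∈ m, p.1 ≤ x ∧ x ≤ p.2) ↔
        (∃ p ∈ (PySem.List.sorted rs (fun r => r.1) false).foldl pvMergeStep [], p.1 ≤ x ∧ x ≤ p.2) := by
      rw [hmdef]
      constructor
      · rintro ⟨p, hp, h⟩; exact ⟨p, List.mem_reverse.mp hp, h⟩
      · rintro ⟨p, hp, h⟩; exact ⟨p, List.mem_reverse.mpr hp, h⟩
    rw [this, c2 x]
    simp only [List.not_mem_nil, false_and, exists_const, false_or]
    constructor
    · rintro ⟨p, hp, h⟩; exact ⟨p, (PySem.List.mem_sorted _ _ _ _).mp hp, h⟩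
    · rintro ⟨p, hp, h⟩; exact ⟨p, (PySem.List.mem_sorted _ _ _ _).mpr hp, h⟩
  induction fs with
  | nil => rfl
  | cons f t ihf =>
    rw [List.all_cons]
    have hone := check_one m f hmp
    by_cases hcov : pvCov rs f
    · have hcond := hone.mpr ((hcovm f).mpr hcov)
      rw [pvCheckFields]
      simp only [hcond, Bool.false_eq_true, if_false]
      rw [ihf, decide_eq_true hcov, Bool.true_and]
    · have hcond : (decide ((pvBisectRight (m.map Prod.fst) f 0 (m.map Prod.fst).length : Int) - 1 < 0) ||
          decide (f > (m.getD ((pvBisectRight (m.map Prod.fst) f 0 (m.map Prod.fst).length : Int) - 1).toNat (0, 0)).2)) = true := by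
        rw [← Bool.not_eq_false]
        intro h
        exact hcov ((hcovm f).mp (hone.mp h))
      rw [pvCheckFields]
      simp only [hcond, if_true]
      rw [decide_eq_false hcov, Bool.false_and]

-- ===== VERDICT (by name: the statement is the Claim_ definition above) =====
theorem field_passes_rule_spec : Claim_equal_field_passes_rule := by
  intro fs rs _
  unfold Spec_field_passes_rule
  rw [lemA, lemB]
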